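-- pv_equiv track=rewrite | github.com/chboishabba/FRACDASH | scripts/agdas_physics8_experiments.py | memory_profile
-- ===== SOURCE A (Python) =====
-- from typing import Mapping, Sequence
--
-- def memory_profile(states: Sequence[tuple[int, ...]], idx: int) -> dict[str, int]:
--     counts = {"negative": 0, "zero": 0, "positive": 0}
--     for state in states:
--         if state[idx] < 0:
--             counts["negative"] += 1
--         elif state[idx] == 0:
--             counts["zero"] += 1
--         else:
--             counts["positive"] += 1
--     return counts
-- ===== SOURCE B (Python) =====
-- def memory_profile(states, idx):
--     vals = [s[idx] for s in states]
--     negative = sum(1 for v in vals if v < 0)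
--     zero = vals.count(0)
--     return {"negative": negative, "zero": zero, "positive": len(vals) - negative - zero}
-- ===== Notes on version B (the rewrite author's own statement) =====
-- stated objective: alternative
-- what changed: Replaces the per-element three-way branch updating a dict with a count-two-and-derive-the-third decomposition: extract the column once, count negatives and zeros, and compute positives as len - negative - zero.
import Mathlib
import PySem

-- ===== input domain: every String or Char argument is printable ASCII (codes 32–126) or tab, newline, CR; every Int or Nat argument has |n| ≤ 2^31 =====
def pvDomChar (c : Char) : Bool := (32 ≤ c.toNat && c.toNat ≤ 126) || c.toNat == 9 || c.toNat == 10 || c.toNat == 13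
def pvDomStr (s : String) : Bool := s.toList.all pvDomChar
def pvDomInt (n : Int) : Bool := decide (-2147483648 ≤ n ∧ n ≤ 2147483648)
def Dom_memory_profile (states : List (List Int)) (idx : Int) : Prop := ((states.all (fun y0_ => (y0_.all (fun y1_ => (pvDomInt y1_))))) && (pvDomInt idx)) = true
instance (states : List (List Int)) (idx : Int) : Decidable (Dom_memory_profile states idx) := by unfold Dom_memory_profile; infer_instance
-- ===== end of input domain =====

-- B replaces A's per-element three-way branch into a dict with: extract the column once,
-- count negatives and zeros, and derive positives as len - negative - zero (objective: alternative decomposition).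
-- Pre_ excludes inputs where Python raises IndexError (idx out of range for some state); the ports use a
-- default there, so the proved equality needs no Pre_ hypothesis, but the claim keeps Python A's domain.

-- ===== PORT A =====
def memory_profile (states : List (List Int)) (idx : Int) : List (String × Int) :=
  let counts : PySem.Dict String Int :=
    PySem.Dict.ofList [("negative", 0), ("zero", 0), ("positive", 0)]
  let counts := states.foldl (fun c state =>
    let v := (PySem.List.pyGet? state idx).getD 0   -- state[idx]; none (IndexError) excluded by Pre_
    if v < 0 then c.modify "negative" 0 (· + 1)
    else if v = 0 then c.modify "zero" 0 (· + 1)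
    else c.modify "positive" 0 (· + 1)) counts
  counts.items

-- ===== PORT B =====
def memory_profile_alt (states : List (List Int)) (idx : Int) : List (String × Int) :=
  let vals := states.map (fun s => (PySem.List.pyGet? s idx).getD 0)  -- s[idx]; IndexError excluded by Pre_
  let negative : Int := (vals.filter (fun v => decide (v < 0))).length
  let zero : Int := vals.count 0
  [("negative", negative), ("zero", zero), ("positive", (vals.length : Int) - negative - zero)]

-- ===== PRECONDITION & SPEC =====
-- Pre_: Python A raises IndexError unless idx is a valid index into every state.
def Pre_memory_profile (states : List (List Int)) (idx : Int) : Prop :=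
  ∀ s ∈ states, PySem.Raise.InRange s.length idx
instance (states : List (List Int)) (idx : Int) : Decidable (Pre_memory_profile states idx) := by
  unfold Pre_memory_profile; infer_instance
def pvWitness_memory_profile : List (List Int) × Int := ([[-2, 5], [0, 1], [3, -1]], 1)

def Spec_memory_profile (states : List (List Int)) (idx : Int) (out : List (String × Int)) : Prop := out = memory_profile_alt states idx
instance (states : List (List Int)) (idx : Int) (out : List (String × Int)) : Decidable (Spec_memory_profile states idx out) := by unfold Spec_memory_profile; infer_instance

-- ===== CLAIM (what is proved, stated in full; the proofs are below) =====
def Claim_equal_memory_profile : Prop := ∀ (states : List (List Int)) (idx : Int), Dom_memory_profile states idx → Pre_memory_profile states idx → Spec_memory_profile states idx (memory_profile states idx)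

-- ===== LEMMAS AND PROOFS =====


-- step function of A's loop, expressed on the extracted value
def mpStep (c : PySem.Dict String Int) (v : Int) : PySem.Dict String Int :=
  if v < 0 then c.modify "negative" 0 (· + 1)
  else if v = 0 then c.modify "zero" 0 (· + 1)
  else c.modify "positive" 0 (· + 1)

lemma mp_fold (vals : List Int) (n z p : Int) :
    vals.foldl mpStep (PySem.Dict.mk [("negative", n), ("zero", z), ("positive", p)])
    = PySem.Dict.mk [("negative", n + (vals.countP (fun v => decide (v < 0)) : Int)),
                     ("zero", z + (vals.countP (fun v => !decide (v < 0) && decide (v = 0)) : Int)),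
                     ("positive", p + (vals.countP (fun v => !decide (v < 0) && !decide (v = 0)) : Int))] := by
  induction vals generalizing n z p with
  | nil => simp
  | cons v vs ih =>
    simp only [List.foldl_cons, List.countP_cons, mpStep]
    by_cases h1 : v < 0
    · have hstep : mpStep (PySem.Dict.mk [("negative", n), ("zero", z), ("positive", p)]) v
          = PySem.Dict.mk [("negative", n + 1), ("zero", z), ("positive", p)] := by
        simp [mpStep, h1, PySem.Dict.modify, PySem.Dict.insert, PySem.Dict.getD, PySem.Dict.get?, PySem.Dict.contains]
      rw [show (if v < 0 then (PySem.Dict.mk [("negative", n), ("zero", z), ("positive", p)]).modify "negative" 0 (· + 1) else if v = 0 then (PySem.Dict.mk [("negative", n), ("zero", z), ("positive", p)]).modify "zero" 0 (· + 1) else (PySem.Dict.mk [("negative", n), ("zero", z), ("positive", p)]).modify "positive" 0 (· + 1)) = PySem.Dict.mk [("negative", n + 1), ("zero", z), ("positive", p)] from by rw [← mpStep]; exact hstep, ih]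
      simp [h1]
      omega
    · by_cases h2 : v = 0
      · have hstep : mpStep (PySem.Dict.mk [("negative", n), ("zero", z), ("positive", p)]) v
            = PySem.Dict.mk [("negative", n), ("zero", z + 1), ("positive", p)] := by
          simp [mpStep, h2, PySem.Dict.modify, PySem.Dict.insert, PySem.Dict.getD, PySem.Dict.get?, PySem.Dict.contains]
        rw [show (if v < 0 then (PySem.Dict.mk [("negative", n), ("zero", z), ("positive", p)]).modify "negative" 0 (· + 1) else if v = 0 then (PySem.Dict.mk [("negative", n), ("zero", z), ("positive", p)]).modify "zero" 0 (· + 1) else (PySem.Dict.mk [("negative", n), ("zero", z), ("positive", p)]).modify "positive" 0 (· + 1)) = PySem.Dict.mk [("negative", n), ("zero", z + 1), ("positive", p)] from by rw [← mpStep]; exact hstep, ih]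
        simp [h2]
        omega
      · have hstep : mpStep (PySem.Dict.mk [("negative", n), ("zero", z), ("positive", p)]) v
            = PySem.Dict.mk [("negative", n), ("zero", z), ("positive", p + 1)] := by
          simp [mpStep, h1, h2, PySem.Dict.modify, PySem.Dict.insert, PySem.Dict.getD, PySem.Dict.get?, PySem.Dict.contains]
        rw [show (if v < 0 then (PySem.Dict.mk [("negative", n), ("zero", z), ("positive", p)]).modify "negative" 0 (· + 1) else if v = 0 then (PySem.Dict.mk [("negative", n), ("zero", z), ("positive", p)]).modify "zero" 0 (· + 1) else (PySem.Dict.mk [("negative", n), ("zero", z), ("positive", p)]).modify "positive" 0 (· + 1)) = PySem.Dict.mk [("negative", n), ("zero", z), ("positive", p + 1)] from by rw [← mpStep]; exact hstep, ih]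
        simp [h1, h2]
        omega

lemma mp_length_split (vals : List Int) :
    (vals.length : Int)
      = (vals.countP (fun v => decide (v < 0)) : Int)
        + (vals.countP (fun v => !decide (v < 0) && decide (v = 0)) : Int)
        + (vals.countP (fun v => !decide (v < 0) && !decide (v = 0)) : Int) := by
  induction vals with
  | nil => simp
  | cons v vs ih =>
    simp only [List.length_cons, List.countP_cons]
    by_cases h1 : v < 0 <;> by_cases h2 : v = 0 <;> simp [h1, h2] <;> omega

lemma mp_count_zero (vals : List Int) :
    vals.countP (fun v => !decide (v < 0) && decide (v = 0)) = vals.count 0 := by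
  have : (fun v : Int => !decide (v < 0) && decide (v = 0)) = (fun v : Int => v == 0) := by
    funext v
    by_cases h : v = 0 <;> simp [h]
  simp [List.count, this, List.countP]

-- ===== VERDICT (by name: the statement is the Claim_ definition above) =====
theorem memory_profile_spec : Claim_equal_memory_profile := by
  intro states idx _ _
  unfold Spec_memory_profile memory_profile memory_profile_alt
  have hfold : states.foldl (fun c state =>
      let v := (PySem.List.pyGet? state idx).getD 0
      if v < 0 then c.modify "negative" 0 (· + 1)
      else if v = 0 then c.modify "zero" 0 (· + 1)
      else c.modify "positive" 0 (· + 1))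
      (PySem.Dict.ofList [("negative", 0), ("zero", 0), ("positive", 0)])
      = (states.map (fun s => (PySem.List.pyGet? s idx).getD 0)).foldl mpStep
          (PySem.Dict.mk [("negative", 0), ("zero", 0), ("positive", 0)]) := by
    rw [List.foldl_map]
    rfl
  simp only [hfold, mp_fold, zero_add, List.cons.injEq, Prod.mk.injEq,
    true_and, and_true]
  set vals := states.map (fun s => (PySem.List.pyGet? s idx).getD 0) with hv
  have hlen := mp_length_split vals
  have hz := mp_count_zero vals
  have hneg : (vals.filter (fun v => decide (v < 0))).length = vals.countP (fun v => decide (v < 0)) := by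
    simp [List.countP_eq_length_filter]
  refine ⟨by omega, by omega, by omega⟩
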